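-- pv_equiv track=rewrite | github.com/fengyanlei33/Fagales_mitogenome | Find_specific_DNA_from_BLAST_v1.1.py | CombineNumber2
-- ===== SOURCE A (Python) =====
-- def CombineNumber2( numbers, diff=30 ):
-- 	### CombineNumber2( [1,2,3,5,7,10,11,20,22], 2 ) -> [ [ 1,7 ], [ 10, 11 ], [ 20, 22 ] ]
-- 	## numbers = set( numbers ) # remove duplicates
-- 	## diff min 1
-- 	numbers = list( set( numbers ) )	# Unique
-- 	numbers.sort()	# put numbers in order
-- 	start = numbers[0]
-- 	end = numbers[0]
-- 	out = []
-- 	for i in range( 1, len( numbers ) ):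
-- 		if numbers[i] - numbers[i-1] < diff + 1:
-- 			end = numbers[i]
-- 		else:
-- 			out.append( [ start, end ] )
-- 			start = numbers[i]
-- 			end = numbers[i]
-- 	## add the last iteration
-- 	out.append( [ start, end ] )
-- 	return out
-- ===== SOURCE B (Python) =====
-- def _merge(left, right, diff):
--     # join two adjacent grouped blocks, fusing the boundary ranges if the gap is small
--     if right[0][0] - left[-1][1] <= diff:
--         return left[:-1] + [[left[-1][0], right[0][1]]] + right[1:]
--     return left + right
--
-- def CombineNumber2(numbers, diff=30):
--     # Divide and conquer: group each half of the sorted unique list, then merge at the boundary.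
--     nums = sorted(set(numbers))
--     if not nums:
--         return []
--     def solve(lo, hi):
--         if hi - lo == 1:
--             return [[nums[lo], nums[lo]]]
--         mid = (lo + hi) // 2
--         return _merge(solve(lo, mid), solve(mid, hi), diff)
--     return solve(0, len(nums))
-- ===== Notes on version B (the rewrite author's own statement) =====
-- stated objective: alternative
-- what changed: Replaces the running start/end accumulator loop with a divide-and-conquer: recursively group each half of the sorted unique list and merge the two grouped blocks at the boundary, fusing the boundary ranges when the gap is within diff.
import Mathlib
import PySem

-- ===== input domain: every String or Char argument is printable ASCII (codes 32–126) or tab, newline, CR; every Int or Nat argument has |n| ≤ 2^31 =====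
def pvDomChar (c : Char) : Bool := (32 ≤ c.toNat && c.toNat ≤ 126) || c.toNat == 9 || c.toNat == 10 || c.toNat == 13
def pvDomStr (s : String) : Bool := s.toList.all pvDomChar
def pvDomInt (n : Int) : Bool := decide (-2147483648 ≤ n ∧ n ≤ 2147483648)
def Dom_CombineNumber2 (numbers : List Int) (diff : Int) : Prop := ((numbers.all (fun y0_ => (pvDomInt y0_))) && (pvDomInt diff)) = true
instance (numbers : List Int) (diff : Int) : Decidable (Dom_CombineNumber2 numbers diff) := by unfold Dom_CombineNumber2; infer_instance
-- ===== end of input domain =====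

-- B replaces A's running start/end accumulator loop by a divide-and-conquer: recursively
-- group each half of the sorted unique list and merge the two blocks at the boundary
-- (alternative decomposition, same result; proved equal on nonempty input).


-- ===== PORT A =====
-- nums = sorted(set(numbers)); loop over range(1, len(nums)) keeping (start, end, out).
def CombineNumber2 (numbers : List Int) (diff : Int) : List (List Int) :=
  let nums := PySem.List.sorted (PySem.Set.ofList numbers) (fun x => x) false
  let st := (PySem.List.pyRange 1 (nums.length : Int) 1).foldl
    (fun (st : Int × Int × List (List Int)) i =>
      if PySem.List.pyGetD nums i 0 - PySem.List.pyGetD nums (i-1) 0 < diff + 1 then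
        (st.1, PySem.List.pyGetD nums i 0, st.2.2)
      else
        (PySem.List.pyGetD nums i 0, PySem.List.pyGetD nums i 0, st.2.2 ++ [[st.1, st.2.1]]))
    (PySem.List.pyGetD nums 0 0, PySem.List.pyGetD nums 0 0, [])
  st.2.2 ++ [[st.1, st.2.1]]

-- ===== PORT B =====
-- _merge(left, right, diff): fuse the boundary ranges of two adjacent grouped blocks.
def CombineNumber2Merge (left right : List (List Int)) (diff : Int) : List (List Int) :=
  if PySem.List.pyGetD (PySem.List.pyGetD right 0 []) 0 0
      - PySem.List.pyGetD (PySem.List.pyGetD left (-1) []) 1 0 ≤ diff then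
    PySem.List.slice left none (some (-1))
      ++ [[PySem.List.pyGetD (PySem.List.pyGetD left (-1) []) 0 0,
           PySem.List.pyGetD (PySem.List.pyGetD right 0 []) 1 0]]
      ++ PySem.List.slice right (some 1) none
  else left ++ right

-- solve(lo, hi): ranges of nums[lo:hi]; the 'hi ≤ lo → []' branch is unreachable from the
-- guarded call below and exists only so the recursion is total (Python's solve is never
-- called with an empty segment).
def CombineNumber2Solve (nums : List Int) (diff : Int) (lo hi : Nat) : List (List Int) :=
  if hi ≤ lo then []
  else if hi - lo = 1 then
    [[PySem.List.pyGetD nums (lo : Int) 0, PySem.List.pyGetD nums (lo : Int) 0]]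
  else
    CombineNumber2Merge (CombineNumber2Solve nums diff lo ((lo + hi) / 2))
      (CombineNumber2Solve nums diff ((lo + hi) / 2) hi) diff
  termination_by hi - lo
  decreasing_by all_goals omega

-- nums = sorted(set(numbers)); empty → []; else divide-and-conquer over index segments.
def CombineNumber2_alt (numbers : List Int) (diff : Int) : List (List Int) :=
  let nums := PySem.List.sorted (PySem.Set.ofList numbers) (fun x => x) false
  if nums = [] then [] else CombineNumber2Solve nums diff 0 nums.length

-- ===== PRECONDITION & SPEC =====
-- Pre_ excludes exactly the empty list, on which A raises IndexError (numbers[0]).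
def Pre_CombineNumber2 (numbers : List Int) (diff : Int) : Prop := numbers ≠ []
instance (numbers : List Int) (diff : Int) : Decidable (Pre_CombineNumber2 numbers diff) := by unfold Pre_CombineNumber2; infer_instance
def pvWitness_CombineNumber2 : List Int × Int := ([1, 2, 3, 5, 7, 10, 11, 20, 22], 2)

def Spec_CombineNumber2 (numbers : List Int) (diff : Int) (out : List (List Int)) : Prop := out = CombineNumber2_alt numbers diff
instance (numbers : List Int) (diff : Int) (out : List (List Int)) : Decidable (Spec_CombineNumber2 numbers diff out) := by unfold Spec_CombineNumber2; infer_instance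

-- ===== CLAIM (what is proved, stated in full; the proofs are below) =====
def Claim_equal_CombineNumber2 : Prop := ∀ (numbers : List Int) (diff : Int), Dom_CombineNumber2 numbers diff → Pre_CombineNumber2 numbers diff → Spec_CombineNumber2 numbers diff (CombineNumber2 numbers diff)
-- ===== LEMMAS AND PROOFS =====

-- common recursive description of the grouping, with `prev` the previous element
def grp (diff : Int) : Int → Int → List Int → List (List Int)
  | start, prev, [] => [[start, prev]]
  | start, prev, y :: ys =>
    if y - prev < diff + 1 then grp diff start y ys else [start, prev] :: grp diff y y ys

-- A's loop body, on an adjacent pair (prev element, current element)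
def stepA (diff : Int) (st : Int × Int × List (List Int)) (p : Int × Int) :
    Int × Int × List (List Int) :=
  if p.2 - p.1 < diff + 1 then (st.1, p.2, st.2.2) else (p.2, p.2, st.2.2 ++ [[st.1, st.2.1]])

-- The index range [1, len xs) mapped through (xs[i-1], xs[i]) is the adjacent-pair list.
lemma map_pyRange_adjacent (xs : List Int) :
    (PySem.List.pyRange 1 (xs.length : Int) 1).map
      (fun i => (PySem.List.pyGetD xs (i-1) 0, PySem.List.pyGetD xs i 0))
    = xs.zip xs.tail := by
  apply List.ext_getElem
  · simp [PySem.List.length_pyRange_one, List.length_tail]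
  · intro k h1 h2
    have hk : k + 1 < xs.length := by
      simp [PySem.List.length_pyRange_one] at h1; omega
    simp only [List.getElem_map, PySem.List.getElem_pyRange_one]
    rw [show (1 : Int) + (k : Int) - 1 = ((k : Nat) : Int) by ring,
        show (1 : Int) + (k : Int) = ((k + 1 : Nat) : Int) by push_cast; ring,
        PySem.List.pyGetD_natCast, PySem.List.pyGetD_natCast]
    have hk0 : k < xs.length := by omega
    simp [List.getD_eq_getElem?_getD, hk, hk0, List.getElem_zip, List.getElem_tail]

-- A's fold over the index range equals the fold of stepA over adjacent pairs.
lemma foldl_idx_eq_foldl_pairs (diff : Int) (xs : List Int) (init : Int × Int × List (List Int)) :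
    (PySem.List.pyRange 1 (xs.length : Int) 1).foldl
      (fun st i => stepA diff st (PySem.List.pyGetD xs (i-1) 0, PySem.List.pyGetD xs i 0)) init
    = (xs.zip xs.tail).foldl (stepA diff) init := by
  rw [← map_pyRange_adjacent, List.foldl_map]

def finA (st : Int × Int × List (List Int)) : List (List Int) := st.2.2 ++ [[st.1, st.2.1]]

-- A's fold over adjacent pairs, started with e = prev, computes grp.
lemma foldl_pairs_eq_grp (diff : Int) :
    ∀ (rest : List Int) (prev start : Int) (out : List (List Int)),
    finA (((prev :: rest).zip rest).foldl (stepA diff) (start, prev, out))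
      = out ++ grp diff start prev rest := by
  intro rest
  induction rest with
  | nil => intro prev start out; simp [grp, finA]
  | cons y ys ih =>
    intro prev start out
    by_cases h : y - prev < diff + 1
    · simpa [grp, stepA, h] using ih y start out
    · simpa [grp, stepA, h, List.append_assoc] using ih y y (out ++ [[start, prev]])

-- the first group of grp starts at `start`; end and tail do not depend on `start`
lemma grp_shape (diff p : Int) (rest : List Int) :
    ∃ e t, ∀ s, grp diff s p rest = [s, e] :: t := by
  induction rest generalizing p with
  | nil => exact ⟨p, [], fun s => rfl⟩
  | cons y ys ih =>
    by_cases h : y - p < diff + 1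
    · obtain ⟨e, t, he⟩ := ih y
      exact ⟨e, t, fun s => by simp [grp, h, he s]⟩
    · obtain ⟨e, t, he⟩ := ih y
      exact ⟨p, grp diff y y ys, fun s => by simp [grp, h]⟩

lemma grp_ne_nil (diff s p : Int) (rest : List Int) : grp diff s p rest ≠ [] := by
  obtain ⟨e, t, he⟩ := grp_shape diff p rest
  simp [he s]

-- merge skips past a left group that is not at the boundary
lemma merge_cons (diff : Int) (a : List Int) (L R : List (List Int)) (h : L ≠ []) :
    CombineNumber2Merge (a :: L) R diff = a :: CombineNumber2Merge L R diff := by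
  unfold CombineNumber2Merge
  rw [PySem.List.pyGetD_neg_one (a :: L) _ (List.cons_ne_nil _ _),
      PySem.List.pyGetD_neg_one L _ h, List.getLast_cons h]
  split_ifs with hc
  · rw [PySem.List.slice_to_neg_one, PySem.List.slice_to_neg_one,
      List.dropLast_cons_of_ne_nil h]
    simp
  · simp

-- the divide-and-conquer merge glues two grp blocks into the grp of the concatenation
lemma grp_append (diff : Int) :
    ∀ (r1 : List Int) (s p m : Int) (r2 : List Int),
    grp diff s p (r1 ++ m :: r2)
      = CombineNumber2Merge (grp diff s p r1) (grp diff m m r2) diff := by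
  intro r1
  induction r1 with
  | nil =>
    intro s p m r2
    obtain ⟨e, t, he⟩ := grp_shape diff m r2
    show grp diff s p (m :: r2) = _
    rw [show grp diff s p [] = [[s, p]] from rfl, he m]
    unfold CombineNumber2Merge
    rw [PySem.List.pyGetD_neg_one [[s, p]] _ (List.cons_ne_nil _ _)]
    simp only [List.getLast_singleton, PySem.List.pyGetD_zero_cons,
      PySem.List.slice_to_neg_one, PySem.List.slice_from_one]
    have e1 : ∀ a b : Int, PySem.List.pyGetD [a, b] (1 : Int) (0 : Int) = b := fun _ _ => rfl
    by_cases h : m - p < diff + 1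
    · have h' : m - p ≤ diff := by omega
      simp only [grp, h, if_pos, he s, e1]
      rw [if_pos (by omega)]
      simp
    · simp only [grp, h, if_neg, not_false_iff, he m, e1]
      rw [if_neg (by omega)]
      simp
  | cons y ys ih =>
    intro s p m r2
    show grp diff s p (y :: (ys ++ m :: r2)) = _
    by_cases h : y - p < diff + 1
    · simp only [grp, h, if_pos]
      rw [ih s y m r2]
    · simp only [grp, h, if_neg, not_false_iff]
      rw [ih y y m r2, merge_cons diff _ _ _ (grp_ne_nil diff y y ys)]

-- the segment nums[lo:hi] as drop/take
def seg (nums : List Int) (lo hi : Nat) : List Int := (nums.drop lo).take (hi - lo)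

lemma seg_cons (nums : List Int) (lo hi : Nat) (h1 : lo < hi) (h2 : lo < nums.length) :
    seg nums lo hi = nums[lo] :: seg nums (lo + 1) hi := by
  unfold seg
  rw [List.drop_eq_getElem_cons h2]
  rw [show hi - lo = (hi - (lo + 1)) + 1 by omega, List.take_succ_cons]

lemma seg_split (nums : List Int) (lo mid hi : Nat) (h1 : lo ≤ mid) (h2 : mid ≤ hi) :
    seg nums lo hi = seg nums lo mid ++ seg nums mid hi := by
  unfold seg
  rw [show hi - lo = (mid - lo) + (hi - mid) by omega, List.take_add, List.drop_drop,
    show lo + (mid - lo) = mid by omega]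

-- grp over a list read as head + rest
def grpL (diff : Int) : List Int → List (List Int)
  | [] => []
  | x :: r => grp diff x x r

lemma grpL_append (diff : Int) (xs ys : List Int) (hx : xs ≠ []) (hy : ys ≠ []) :
    grpL diff (xs ++ ys) = CombineNumber2Merge (grpL diff xs) (grpL diff ys) diff := by
  cases xs with
  | nil => exact absurd rfl hx
  | cons x r =>
    cases ys with
    | nil => exact absurd rfl hy
    | cons m r2 =>
      show grp diff x x (r ++ m :: r2) = _
      exact grp_append diff r x x m r2

-- solve computes grpL on its segment
lemma solve_eq_grpL (nums : List Int) (diff : Int) :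
    ∀ (k lo hi : Nat), hi - lo ≤ k → lo < hi → hi ≤ nums.length →
    CombineNumber2Solve nums diff lo hi = grpL diff (seg nums lo hi) := by
  intro k
  induction k with
  | zero => intro lo hi hk h1 _; omega
  | succ n ih =>
    intro lo hi hk h1 h2
    by_cases hone : hi - lo = 1
    · have hlt : lo < nums.length := by omega
      unfold CombineNumber2Solve
      rw [if_neg (by omega), if_pos hone]
      rw [seg_cons nums lo hi h1 hlt,
        show seg nums (lo + 1) hi = [] by unfold seg; rw [show hi - (lo+1) = 0 by omega]; rfl]
      show _ = grp diff nums[lo] nums[lo] []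
      rw [PySem.List.pyGetD_natCast]
      simp [grp, List.getD_eq_getElem?_getD, hlt]
    · have h2lt : lo + 2 ≤ hi := by omega
      have hmid1 : lo < (lo + hi) / 2 := by omega
      have hmid2 : (lo + hi) / 2 < hi := by omega
      unfold CombineNumber2Solve
      rw [if_neg (by omega), if_neg hone]
      rw [ih lo ((lo + hi) / 2) (by omega) hmid1 (by omega),
          ih ((lo + hi) / 2) hi (by omega) hmid2 h2,
          ← grpL_append diff _ _ ?_ ?_,
          ← seg_split nums lo ((lo + hi) / 2) hi (by omega) (by omega)]
      · unfold seg
        intro hcon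
        have := congrArg List.length hcon
        simp [List.length_take, List.length_drop] at this
        omega
      · unfold seg
        intro hcon
        have := congrArg List.length hcon
        simp [List.length_take, List.length_drop] at this
        omega

-- ===== VERDICT (by name: the statement is the Claim_ definition above) =====
theorem CombineNumber2_spec : Claim_equal_CombineNumber2 := by
  intro numbers diff _ hpre
  show CombineNumber2 numbers diff = CombineNumber2_alt numbers diff
  show finA ((PySem.List.pyRange 1 ((PySem.List.sorted (PySem.Set.ofList numbers) (fun x => x) false).length : Int) 1).foldl
      (fun (st : Int × Int × List (List Int)) i =>
        if PySem.List.pyGetD (PySem.List.sorted (PySem.Set.ofList numbers) (fun x => x) false) i 0 - PySem.List.pyGetD (PySem.List.sorted (PySem.Set.ofList numbers) (fun x => x) false) (i-1) 0 < diff + 1 then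
          (st.1, PySem.List.pyGetD (PySem.List.sorted (PySem.Set.ofList numbers) (fun x => x) false) i 0, st.2.2)
        else
          (PySem.List.pyGetD (PySem.List.sorted (PySem.Set.ofList numbers) (fun x => x) false) i 0, PySem.List.pyGetD (PySem.List.sorted (PySem.Set.ofList numbers) (fun x => x) false) i 0, st.2.2 ++ [[st.1, st.2.1]]))
      (PySem.List.pyGetD (PySem.List.sorted (PySem.Set.ofList numbers) (fun x => x) false) 0 0, PySem.List.pyGetD (PySem.List.sorted (PySem.Set.ofList numbers) (fun x => x) false) 0 0, []))
    = (if PySem.List.sorted (PySem.Set.ofList numbers) (fun x => x) false = [] then []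
       else CombineNumber2Solve (PySem.List.sorted (PySem.Set.ofList numbers) (fun x => x) false) diff 0 (PySem.List.sorted (PySem.Set.ofList numbers) (fun x => x) false).length)
  have hne : PySem.List.sorted (PySem.Set.ofList numbers) (fun x => x) false ≠ [] := by
    cases numbers with
    | nil => exact absurd rfl hpre
    | cons a as =>
      intro hcon
      have ha : a ∈ PySem.List.sorted (PySem.Set.ofList (a :: as)) (fun x => x) false := by
        rw [PySem.List.mem_sorted, PySem.Set.mem_ofList]
        exact List.mem_cons_self
      rw [hcon] at ha
      exact (List.not_mem_nil) ha
  obtain ⟨n0, rest, hn⟩ := List.exists_cons_of_ne_nil hne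
  rw [hn, if_neg (List.cons_ne_nil n0 rest)]
  have hbody : (fun (st : Int × Int × List (List Int)) (i : Int) =>
      if PySem.List.pyGetD (n0 :: rest) i 0 - PySem.List.pyGetD (n0 :: rest) (i-1) 0 < diff + 1 then
        (st.1, PySem.List.pyGetD (n0 :: rest) i 0, st.2.2)
      else
        (PySem.List.pyGetD (n0 :: rest) i 0, PySem.List.pyGetD (n0 :: rest) i 0,
          st.2.2 ++ [[st.1, st.2.1]]))
    = (fun st i => stepA diff st
        (PySem.List.pyGetD (n0 :: rest) (i-1) 0, PySem.List.pyGetD (n0 :: rest) i 0)) := rfl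
  rw [hbody, foldl_idx_eq_foldl_pairs]
  have hzip : (n0 :: rest).tail = rest := rfl
  rw [hzip, PySem.List.pyGetD_zero_cons]
  rw [solve_eq_grpL (n0 :: rest) diff (n0 :: rest).length 0 (n0 :: rest).length
    (by omega) (by simp) (le_refl _)]
  rw [show seg (n0 :: rest) 0 (n0 :: rest).length = n0 :: rest by
    unfold seg; simp]
  show _ = grp diff n0 n0 rest
  simpa [finA] using foldl_pairs_eq_grp diff rest n0 n0 []
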